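-- pv_equiv track=rewrite | github.com/Cortado-sh/Wst-p-do-programowania | Zad7.py | create_matrix_with_ones_on_edges
-- ===== SOURCE A (Python) =====
-- def create_matrix_with_ones_on_edges(size):
--     matrix = [[0] * size for _ in range(size)]
--     for i in range(size):
--         matrix[0][i] = 1
--         matrix[size - 1][i] = 1
--         matrix[i][0] = 1
--         matrix[i][size - 1] = 1
--     return matrix
-- ===== SOURCE B (Python) =====
-- def create_matrix_with_ones_on_edges(size):
--     def row(i):
--         if i == 0 or i == size - 1:
--             return [1] * size
--         return [1 if j == 0 or j == size - 1 else 0 for j in range(size)]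
--     return [row(i) for i in range(size)]
-- ===== Notes on version B (the rewrite author's own statement) =====
-- stated objective: simpler
-- what changed: B constructs the matrix row by row, deciding each cell directly from its position (boundary predicate), instead of zero-initializing the whole matrix and then overwriting the edges with a separate patching loop of four in-place assignments.
import Mathlib
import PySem

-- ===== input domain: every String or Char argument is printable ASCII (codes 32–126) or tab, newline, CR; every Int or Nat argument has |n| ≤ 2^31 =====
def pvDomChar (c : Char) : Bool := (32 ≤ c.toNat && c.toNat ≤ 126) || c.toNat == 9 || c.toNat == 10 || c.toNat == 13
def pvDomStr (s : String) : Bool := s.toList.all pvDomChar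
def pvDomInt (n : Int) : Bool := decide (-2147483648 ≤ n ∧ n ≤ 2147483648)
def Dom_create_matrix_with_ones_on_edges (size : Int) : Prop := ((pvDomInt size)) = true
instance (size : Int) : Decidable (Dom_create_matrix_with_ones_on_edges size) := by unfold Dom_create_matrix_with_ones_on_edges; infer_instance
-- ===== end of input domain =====

-- B builds each row directly from its position (boundary predicate) instead of
-- zero-initializing and patching the edges in place; objective: simpler.

-- ===== PORT A =====
-- matrix[r][c] = v, with both indices known nonnegative and in range whenever the
-- loop body runs (0 ≤ r,c < size), so .toNat at the call sites below is exact.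
def pvSetCell (m : List (List Int)) (r c : Nat) (v : Int) : List (List Int) :=
  m.set r ((m.getD r []).set c v)

def create_matrix_with_ones_on_edges (size : Int) : List (List Int) :=
  -- [[0] * size for _ in range(size)]  ([0]*size = replicate size.toNat 0: empty for size ≤ 0, as in Python)
  let matrix := (PySem.List.pyRange 0 size 1).map (fun _ => List.replicate size.toNat (0 : Int))
  (PySem.List.pyRange 0 size 1).foldl
    (fun m i =>
      let m := pvSetCell m 0 i.toNat 1
      let m := pvSetCell m (size - 1).toNat i.toNat 1
      let m := pvSetCell m i.toNat 0 1
      pvSetCell m i.toNat (size - 1).toNat 1)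
    matrix

-- ===== PORT B =====
def create_matrix_with_ones_on_edges_alt (size : Int) : List (List Int) :=
  (PySem.List.pyRange 0 size 1).map (fun i =>
    if i = 0 ∨ i = size - 1 then List.replicate size.toNat (1 : Int)
    else (PySem.List.pyRange 0 size 1).map (fun j => if j = 0 ∨ j = size - 1 then (1 : Int) else 0))

-- ===== PRECONDITION & SPEC =====
def Spec_create_matrix_with_ones_on_edges (size : Int) (out : List (List Int)) : Prop := out = create_matrix_with_ones_on_edges_alt size
instance (size : Int) (out : List (List Int)) : Decidable (Spec_create_matrix_with_ones_on_edges size out) := by unfold Spec_create_matrix_with_ones_on_edges; infer_instance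

-- ===== CLAIM (what is proved, stated in full; the proofs are below) =====
def Claim_equal_create_matrix_with_ones_on_edges : Prop := ∀ (size : Int), Dom_create_matrix_with_ones_on_edges size → Spec_create_matrix_with_ones_on_edges size (create_matrix_with_ones_on_edges size)

-- ===== LEMMAS AND PROOFS =====

-- "matrix as a function of position" normal form
def pvMats (n : Nat) (f : Nat → Nat → Int) : List (List Int) :=
  (List.range n).map (fun r => (List.range n).map (fun c => f r c))

lemma pvMats_congr {n : Nat} {f g : Nat → Nat → Int}
    (h : ∀ r c, r < n → c < n → f r c = g r c) : pvMats n f = pvMats n g := by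
  unfold pvMats
  refine List.map_congr_left (fun r hr => ?_)
  refine List.map_congr_left (fun c hc => ?_)
  exact h r c (List.mem_range.mp hr) (List.mem_range.mp hc)

lemma pvSet_map_range {α : Type} (n : Nat) (g : Nat → α) (c : Nat) (_hc : c < n) (v : α) :
    ((List.range n).map g).set c v = (List.range n).map (fun j => if j = c then v else g j) := by
  apply List.ext_getElem
  · simp
  · intro i h1 h2
    simp only [List.getElem_set, List.getElem_map, List.getElem_range] at *
    by_cases h : c = i
    · subst h
      simp
    · rw [if_neg h, if_neg (fun hh => h hh.symm)]

lemma pvSetCell_mats (n : Nat) (f : Nat → Nat → Int) (r c : Nat) (hr : r < n) (hc : c < n) (v : Int) :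
    pvSetCell (pvMats n f) r c v
      = pvMats n (fun r' c' => if r' = r ∧ c' = c then v else f r' c') := by
  unfold pvSetCell pvMats
  have hlen : r < ((List.range n).map (fun r => (List.range n).map (fun c => f r c))).length := by
    simpa using hr
  rw [List.getD_eq_getElem _ _ hlen]
  simp only [List.getElem_map, List.getElem_range]
  rw [pvSet_map_range n _ c hc, pvSet_map_range n _ r hr]
  refine List.map_congr_left (fun r' hr' => ?_)
  by_cases h : r' = r
  · subst h
    rw [if_pos rfl]
    refine List.map_congr_left (fun c' _ => ?_)
    by_cases h2 : c' = c <;> simp [h2]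
  · simp only [if_neg h]
    refine List.map_congr_left (fun c' _ => ?_)
    simp [h]

-- one iteration of A's loop, in Nat form
def pvStepN (n : Nat) (m : List (List Int)) (k : Nat) : List (List Int) :=
  pvSetCell (pvSetCell (pvSetCell (pvSetCell m 0 k 1) (n - 1) k 1) k 0 1) k (n - 1) 1

-- state of the matrix after A's loop has processed i = 0 .. a-1
def pvF (n a r c : Nat) : Int :=
  if ((r = 0 ∨ r = n - 1) ∧ c < a) ∨ ((c = 0 ∨ c = n - 1) ∧ r < a) then 1 else 0

lemma pvStepN_mats (n : Nat) (hn : 0 < n) (f : Nat → Nat → Int) (k : Nat) (hk : k < n) :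
    pvStepN n (pvMats n f) k
      = pvMats n (fun r c =>
          if ((r = 0 ∨ r = n - 1) ∧ c = k) ∨ ((c = 0 ∨ c = n - 1) ∧ r = k) then 1 else f r c) := by
  unfold pvStepN
  rw [pvSetCell_mats n _ 0 k hn hk, pvSetCell_mats n _ (n - 1) k (by omega) hk,
      pvSetCell_mats n _ k 0 hk hn, pvSetCell_mats n _ k (n - 1) hk (by omega)]
  refine pvMats_congr (fun r c _ _ => ?_)
  split_ifs <;> tauto

lemma pvFold_invariant (n : Nat) (hn : 0 < n) :
    ∀ a, a ≤ n →
      (List.range a).foldl (pvStepN n) (pvMats n (pvF n 0)) = pvMats n (pvF n a) := by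
  intro a
  induction a with
  | zero => intro _; simp
  | succ a ih =>
    intro ha
    rw [List.range_succ, List.foldl_append, ih (by omega)]
    simp only [List.foldl_cons, List.foldl_nil]
    rw [pvStepN_mats n hn (pvF n a) a (by omega)]
    refine pvMats_congr (fun r c hr hc => ?_)
    unfold pvF
    split_ifs <;> omega

lemma pyRange_zero_size (size : Int) :
    PySem.List.pyRange 0 size 1 = (List.range size.toNat).map (fun (k : Nat) => (k : Int)) := by
  rw [PySem.List.pyRange_one]
  simp only [sub_zero]
  refine List.map_congr_left (fun k _ => ?_)
  exact zero_add _

theorem create_matrix_with_ones_on_edges_eq (size : Int) :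
    create_matrix_with_ones_on_edges size = create_matrix_with_ones_on_edges_alt size := by
  by_cases hpos : 0 < size
  · set n := size.toNat with hn
    have hsize : size = (n : Int) := by omega
    have hn0 : 0 < n := by omega
    -- rewrite A into the Nat fold
    have hA : create_matrix_with_ones_on_edges size
        = (List.range n).foldl (pvStepN n) (pvMats n (pvF n 0)) := by
      unfold create_matrix_with_ones_on_edges
      rw [pyRange_zero_size size]
      rw [List.foldl_map]
      have hinit : ((List.range n).map (fun (k : Nat) => (k : Int))).map (fun _ => List.replicate size.toNat (0 : Int))
          = pvMats n (pvF n 0) := by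
        rw [List.map_map]
        unfold pvMats
        refine List.map_congr_left (fun r _ => ?_)
        rw [← hn]
        have : (List.range n).map (fun c => pvF n 0 r c) = (List.range n).map (fun _ => (0 : Int)) := by
          refine List.map_congr_left (fun c _ => ?_)
          unfold pvF
          simp
        rw [this, List.map_const', List.length_range]
        rfl
      rw [hinit]
      apply PySem.List.foldl_congr_mem
      intro m k hk
      have hk' : k < n := by
        have := List.mem_range.mp hk; omega
      unfold pvStepN
      have h1 : ((k : Int)).toNat = k := by omega
      have h2 : (size - 1).toNat = n - 1 := by omega
      rw [h1, h2]
    rw [hA, pvFold_invariant n hn0 n le_rfl]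
    -- rewrite B into pvMats form
    unfold create_matrix_with_ones_on_edges_alt
    rw [pyRange_zero_size size, List.map_map]
    unfold pvMats
    refine List.map_congr_left (fun r hr => ?_)
    have hrn : r < n := List.mem_range.mp hr
    simp only [Function.comp_apply]
    by_cases hredge : (r : Int) = 0 ∨ (r : Int) = size - 1
    · rw [if_pos hredge]
      have : ∀ c ∈ List.range n, pvF n n r c = 1 := by
        intro c hc
        have hcn : c < n := List.mem_range.mp hc
        unfold pvF
        rw [if_pos]
        left
        constructor
        · omega
        · exact hcn
      rw [List.map_congr_left this, List.map_const', List.length_range, hsize]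
      simp
    · rw [if_neg hredge]
      rw [List.map_map]
      refine List.map_congr_left (fun c hc => ?_)
      have hcn : c < n := List.mem_range.mp hc
      simp only [Function.comp_apply]
      unfold pvF
      by_cases hcedge : (c : Int) = 0 ∨ (c : Int) = size - 1
      · rw [if_pos hcedge, if_pos]
        right
        constructor
        · omega
        · exact hrn
      · rw [if_neg hcedge, if_neg]
        omega
  · -- size ≤ 0: range(size) is empty, both return []
    have h : PySem.List.pyRange 0 size 1 = [] := by
      apply PySem.List.pyRange_one_eq_nil
      omega
    unfold create_matrix_with_ones_on_edges create_matrix_with_ones_on_edges_alt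
    rw [h]
    simp

-- ===== VERDICT (by name: the statement is the Claim_ definition above) =====
theorem create_matrix_with_ones_on_edges_spec : Claim_equal_create_matrix_with_ones_on_edges := by
  intro size _
  unfold Spec_create_matrix_with_ones_on_edges
  exact create_matrix_with_ones_on_edges_eq size
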